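-- pv_equiv track=rewrite | github.com/fraggle-inc/komma-dev | komma_dev/parsing.py | _split_string
-- ===== SOURCE A (Python) =====
-- WHITESPACE_TYPE = "WHITESPACE"
--
-- TEXT_TYPE = "TEXT"
--
-- def _split_string(text):
--     substrings = []
--     last_type = None
--     start_index = None
--     for index, char in enumerate(text):
--         current_type = _get_type(char)
--         if current_type == last_type:
--             continue
--
--         if last_type:
--             temp = text[start_index:index]
--             substrings += [temp]
--
--         start_index = index
--         last_type = current_type
--
--     if last_type:
--         substrings += [text[start_index:]]
--     return substrings
--
-- def _get_type(char):
--     if char == " ":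
--         return WHITESPACE_TYPE
--     return TEXT_TYPE
-- ===== SOURCE B (Python) =====
-- def _split_string(text):
--     runs = []
--     for ch in text:
--         if runs and (runs[-1][0] == " ") == (ch == " "):
--             runs[-1] = runs[-1] + ch
--         else:
--             runs.append(ch)
--     return runs
-- ===== Notes on version B (the rewrite author's own statement) =====
-- stated objective: simpler
-- what changed: Replaces A's last_type/start_index boundary-tracking scan with index slicing by a single accumulator loop that extends or starts the last run directly, dropping the type constants and the _get_type helper.
import Mathlib
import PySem

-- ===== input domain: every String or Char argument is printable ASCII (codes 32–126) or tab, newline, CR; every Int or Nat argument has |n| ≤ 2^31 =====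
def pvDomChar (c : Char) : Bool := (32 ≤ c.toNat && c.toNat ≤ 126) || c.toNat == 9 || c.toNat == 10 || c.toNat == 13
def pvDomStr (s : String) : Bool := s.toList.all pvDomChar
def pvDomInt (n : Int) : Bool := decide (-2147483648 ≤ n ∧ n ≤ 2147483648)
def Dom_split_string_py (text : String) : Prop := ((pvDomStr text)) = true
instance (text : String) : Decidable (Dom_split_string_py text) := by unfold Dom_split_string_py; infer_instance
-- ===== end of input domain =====

-- B replaces A's last_type/start_index boundary scan with slicing by a loop that
-- extends or starts the last run directly (simpler; no speed claim).

-- ===== PORT A =====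
-- _get_type
def pvGetType (c : Char) : String := if c = ' ' then "WHITESPACE" else "TEXT"

-- one step of A's for-loop body; state = (substrings, last_type, start_index)
def pvStepA (cs : List Char) (s : List String × Option String × Option Int)
    (p : Int × Char) : List String × Option String × Option Int :=
  let current_type := pvGetType p.2
  if some current_type = s.2.1 then s
  else
    let substrings :=
      -- 'if last_type:' — last_type is None or a nonempty string, so truthiness = isSome
      if s.2.1.isSome then
        s.1 ++ [String.ofList (PySem.List.slice cs s.2.2 (some p.1))]
      else s.1
    (substrings, some current_type, some p.1)

def split_string_py (text : String) : List String :=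
  let cs := text.toList
  let st := (PySem.List.enumerate cs 0).foldl (pvStepA cs) ([], none, none)
  if st.2.1.isSome then st.1 ++ [String.ofList (PySem.List.slice cs st.2.2 none)]
  else st.1

-- ===== PORT B =====
-- one step of B's loop: extend the last run if same type (space vs non-space), else start a new one
def pvStepB (runs : List (List Char)) (ch : Char) : List (List Char) :=
  match runs.getLast? with
  | none => runs ++ [[ch]]
  | some r =>
    if (r.head? = some ' ') = (ch = ' ') then runs.dropLast ++ [r ++ [ch]]
    else runs ++ [[ch]]

def split_string_py_alt (text : String) : List String :=
  (text.toList.foldl pvStepB []).map String.ofList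

-- ===== PRECONDITION & SPEC =====
def Spec_split_string_py (text : String) (out : List String) : Prop := out = split_string_py_alt text
instance (text : String) (out : List String) : Decidable (Spec_split_string_py text out) := by unfold Spec_split_string_py; infer_instance

-- ===== CLAIM (what is proved, stated in full; the proofs are below) =====
def Claim_equal_split_string_py : Prop := ∀ (text : String), Dom_split_string_py text → Spec_split_string_py text (split_string_py text)

-- ===== LEMMAS AND PROOFS =====

-- reference: maximal runs of equal space-ness, front to back
def pvChunksAux (run : List Char) : List Char → List (List Char)
  | [] => [run]
  | c :: cs => if (run.head? = some ' ') = (c = ' ') then pvChunksAux (run ++ [c]) cs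
               else run :: pvChunksAux [c] cs

def pvChunks : List Char → List (List Char)
  | [] => []
  | c :: cs => pvChunksAux [c] cs

theorem pvB_aux (cs : List Char) :
    ∀ (acc : List (List Char)) (run : List Char),
      List.foldl pvStepB (acc ++ [run]) cs = acc ++ pvChunksAux run cs := by
  induction cs with
  | nil => intro acc run; simp [pvChunksAux]
  | cons c cs ih =>
    intro acc run
    simp only [List.foldl_cons, pvChunksAux]
    have hlast : (acc ++ [run]).getLast? = some run := by simp
    by_cases h : (run.head? = some ' ') = (c = ' ')
    · rw [show pvStepB (acc ++ [run]) c = acc ++ [run ++ [c]] by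
        simp [pvStepB, hlast, h]]
      rw [ih acc (run ++ [c]), if_pos h]
    · rw [show pvStepB (acc ++ [run]) c = (acc ++ [run]) ++ [[c]] by
        simp [pvStepB, hlast, h]]
      rw [ih (acc ++ [run]) [c], if_neg h]
      simp

theorem pvB_chunks (cs : List Char) :
    List.foldl pvStepB [] cs = pvChunks cs := by
  cases cs with
  | nil => rfl
  | cons c cs =>
    have h0 : pvStepB [] c = [] ++ [[c]] := by simp [pvStepB]
    simp only [List.foldl_cons, h0, pvChunks]
    simpa using pvB_aux cs [] [c]

-- A side: the loop invariant.  Processing the suffix enumerate (cs.drop i) i with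
-- pending segment cs[j:i] (nonempty, all chars of space-ness t) yields subs ++ chunks.
theorem pvA_aux (cs : List Char) :
    ∀ (suf : List Char) (i j : Nat) (subs : List String) (t : Bool),
      cs.drop i = suf → j < i → i ≤ cs.length →
      (∀ x ∈ (cs.drop j).take (i - j), (x == ' ') = t) →
      (let st := List.foldl (pvStepA cs)
          (subs, some (pvGetType (if t then ' ' else 'x')), some (j : Int))
          (PySem.List.enumerate suf (i : Int));
       (if st.2.1.isSome then st.1 ++ [String.ofList (PySem.List.slice cs st.2.2 none)]
        else st.1))
      = subs ++ (pvChunksAux ((cs.drop j).take (i - j)) suf).map String.ofList := by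
  intro suf
  induction suf with
  | nil =>
    intro i j subs t hdrop hji hilen hrun
    have hfull : (cs.drop j).take (i - j) = cs.drop j := by
      apply List.take_of_length_le
      have h := List.length_drop (l := cs) (i := i)
      rw [hdrop] at h; simp at h
      simp; omega
    simp only [PySem.List.enumerate_nil, List.foldl_nil, pvChunksAux, hfull]
    simp [PySem.List.slice_from_natCast]
  | cons c suf ih =>
    intro i j subs t hdrop hji hilen hrun
    have hi_lt : i < cs.length := by
      by_contra h
      have h2 : cs.drop i = [] := List.drop_eq_nil_of_le (by omega)
      rw [hdrop] at h2; simp at h2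
    have hci : cs[i]? = some c := by
      have h : (cs.drop i)[0]? = cs[i + 0]? := List.getElem?_drop
      rw [hdrop] at h; simpa using h.symm
    have hdrop' : cs.drop (i + 1) = suf := by
      have h : List.drop 1 (List.drop i cs) = List.drop (i + 1) cs := List.drop_drop
      rw [← h, hdrop, List.drop_one]; rfl
    set run := (cs.drop j).take (i - j) with hrundef
    have hrun_ne : run ≠ [] := by
      have hl : run.length = min (i - j) (cs.length - j) := by simp [hrundef]
      intro h; rw [h] at hl; simp at hl; omega
    obtain ⟨a, r, hra⟩ := List.exists_cons_of_ne_nil hrun_ne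
    have ha : (a == ' ') = t := hrun a (hra ▸ List.mem_cons_self)
    have hhead_t : (run.head? = some ' ') ↔ (t = true) := by
      rw [hra]; simp only [List.head?_cons, Option.some.injEq]
      constructor
      · intro h; rw [← ha, h]; simp
      · intro ht; rw [ht] at ha; simpa using ha
    have hextend : (cs.drop j).take (i + 1 - j) = run ++ [c] := by
      rw [show i + 1 - j = (i - j) + 1 by omega, List.take_add_one]
      congr 1
      have h2 : (cs.drop j)[i - j]? = cs[j + (i - j)]? := List.getElem?_drop
      rw [h2, show j + (i - j) = i by omega, hci]; rfl
    simp only [PySem.List.enumerate_cons, List.foldl_cons]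
    by_cases hc : (c == ' ') = t
    · -- same type: state unchanged
      have hgt_c : pvGetType c = pvGetType (if t then ' ' else 'x') := by
        cases t with
        | true => have h : c = ' ' := by simpa using hc
                  simp [h]
        | false => have h : ¬ c = ' ' := by simpa using hc
                   simp [pvGetType, h]
      have hstep : pvStepA cs (subs, some (pvGetType (if t then ' ' else 'x')), some (j : Int)) ((i : Int), c)
          = (subs, some (pvGetType (if t then ' ' else 'x')), some (j : Int)) := by
        simp only [pvStepA]
        rw [if_pos (by rw [hgt_c])]
      rw [hstep]
      have hrun' : ∀ x ∈ (cs.drop j).take (i + 1 - j), (x == ' ') = t := by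
        rw [hextend]; intro x hx
        rcases List.mem_append.mp hx with h | h
        · exact hrun x h
        · simp at h; rw [h]; exact hc
      have hih := ih (i + 1) j subs t hdrop' (by omega) (by omega) hrun'
      rw [show ((i : Int) + 1) = ((i + 1 : Nat) : Int) by push_cast; ring]
      rw [hih, hextend]
      rw [pvChunksAux, if_pos]
      rw [eq_iff_iff, hhead_t]
      constructor
      · intro ht; rw [ht] at hc; simpa using hc
      · intro h; rw [← hc, h]; simp
    · -- type changes: emit cs[j:i], restart at i
      have hne : ¬ (some (pvGetType c) = some (pvGetType (if t then ' ' else 'x'))) := by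
        intro h
        apply hc
        simp only [Option.some.injEq] at h
        cases t <;> by_cases hcc : c = ' ' <;> simp_all [pvGetType]
      have hstep : pvStepA cs (subs, some (pvGetType (if t then ' ' else 'x')), some (j : Int)) ((i : Int), c)
          = (subs ++ [String.ofList run], some (pvGetType c), some (i : Int)) := by
        simp only [pvStepA]
        rw [if_neg hne]
        simp only [Option.isSome_some, if_pos]
        rw [PySem.List.slice_natCast]
      rw [hstep]
      have hrun1 : ∀ x ∈ (cs.drop i).take (i + 1 - i), (x == ' ') = (c == ' ') := by
        rw [show i + 1 - i = 1 by omega, hdrop]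
        intro x hx; simp at hx; rw [hx]
      have hgt2 : pvGetType c = pvGetType (if (c == ' ') then ' ' else 'x') := by
        by_cases h : c = ' ' <;> simp [pvGetType, h]
      rw [hgt2]
      have hih := ih (i + 1) i (subs ++ [String.ofList run]) (c == ' ') hdrop' (by omega) (by omega) hrun1
      rw [show ((i : Int) + 1) = ((i + 1 : Nat) : Int) by push_cast; ring]
      rw [hih]
      have hone : (cs.drop i).take (i + 1 - i) = [c] := by
        rw [show i + 1 - i = 1 by omega, hdrop]; rfl
      rw [hone, pvChunksAux, if_neg]
      · simp
      · intro h
        rw [eq_iff_iff, hhead_t] at h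
        apply hc
        cases t with
        | true => have hcc := h.mp rfl; simp [hcc]
        | false =>
          have hcc : ¬ c = ' ' := fun hcc => absurd (h.mpr hcc) (by simp)
          simp [hcc]

theorem pvA_chunks (text : String) :
    split_string_py text = (pvChunks text.toList).map String.ofList := by
  cases hcs : text.toList with
  | nil =>
    simp [split_string_py, hcs, pvChunks, PySem.List.enumerate_nil]
  | cons c cs =>
    have hfirst : pvStepA (c :: cs) ([], none, none) ((0 : Int), c)
        = ([], some (pvGetType c), some (0 : Int)) := by
      simp [pvStepA]
    have hgt2 : pvGetType c = pvGetType (if (c == ' ') then ' ' else 'x') := by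
      by_cases h : c = ' ' <;> simp [pvGetType, h]
    have hrun1 : ∀ x ∈ ((c :: cs).drop 0).take (1 - 0), (x == ' ') = (c == ' ') := by
      intro x hx; simp at hx; rw [hx]
    have hmain := pvA_aux (c :: cs) cs 1 0 [] (c == ' ')
      (by rfl) (by omega) (by simp) hrun1
    simp only [split_string_py, hcs]
    simp only [PySem.List.enumerate_cons, List.foldl_cons]
    rw [hfirst, hgt2]
    rw [show ((0:Int) + 1) = ((1 : Nat) : Int) by norm_num]
    have hone : ((c :: cs).drop 0).take (1 - 0) = [c] := by rfl
    rw [hone] at hmain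
    simpa [pvChunks] using hmain

-- ===== VERDICT (by name: the statement is the Claim_ definition above) =====
theorem split_string_py_spec : Claim_equal_split_string_py := by
  intro text _
  unfold Spec_split_string_py split_string_py_alt
  rw [pvB_chunks, pvA_chunks]
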